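-- pv_equiv track=rewrite | github.com/lopentu/CxLM | src/conart/token_mappings.py | get_tok_char_map
-- ===== SOURCE A (Python) =====
-- def get_tok_char_map(cxinst):
--     toks = cxinst["text"]
--     tok_char_map = {}
--     counter = 0
--     for tok_i, tok in enumerate(toks):
--         tok_char_map[tok_i] = [char_i+counter for char_i in range(len(tok))]
--         counter += len(tok)
--     return tok_char_map
-- ===== SOURCE B (Python) =====
-- def get_tok_char_map(cxinst):
--     toks = cxinst["text"]
--     # label each character of the concatenated text with its owning token's index
--     owners = [tok_i for tok_i, tok in enumerate(toks) for _ in tok]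
--     # scatter the character positions into per-token buckets
--     buckets = {tok_i: [] for tok_i in range(len(toks))}
--     for tok_i, char_i in zip(owners, range(len(owners))):
--         buckets[tok_i].append(char_i)
--     return buckets
-- ===== Notes on version B (the rewrite author's own statement) =====
-- stated objective: alternative
-- what changed: B inverts the computation: it flattens the tokens into a per-character list of owner token indices, then scatters each character position of the concatenation into pre-initialised per-token buckets, instead of A's single loop that threads a running character counter and emits a shifted range per token.
import Mathlib
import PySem

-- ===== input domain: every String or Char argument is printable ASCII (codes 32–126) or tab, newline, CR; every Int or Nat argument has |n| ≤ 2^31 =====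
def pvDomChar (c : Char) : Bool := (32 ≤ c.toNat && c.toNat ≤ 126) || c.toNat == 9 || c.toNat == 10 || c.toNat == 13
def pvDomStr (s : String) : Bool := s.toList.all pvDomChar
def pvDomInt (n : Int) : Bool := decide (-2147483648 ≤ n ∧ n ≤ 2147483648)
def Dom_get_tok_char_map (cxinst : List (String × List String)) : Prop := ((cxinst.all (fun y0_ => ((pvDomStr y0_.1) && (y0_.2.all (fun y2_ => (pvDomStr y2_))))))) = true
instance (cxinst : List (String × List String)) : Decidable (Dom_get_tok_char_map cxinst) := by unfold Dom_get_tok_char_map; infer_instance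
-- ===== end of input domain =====

-- B inverts A's counter loop: it labels each character of the concatenated text with its
-- owning token's index and scatters the character positions into per-token buckets
-- (objective: alternative, same cost).

-- ===== PORT A =====
def get_tok_char_map (cxinst : List (String × List String)) : List (Int × List Int) :=
  match (PySem.Dict.mk cxinst).get? "text" with
  | none => []   -- Python raises KeyError here; excluded by Pre_
  | some toks =>
      (((PySem.List.enumerate toks).foldl
          (fun (st : PySem.Dict Int (List Int) × Int) p =>
            (st.1.insert p.1
               ((PySem.List.pyRange 0 (PySem.Str.len p.2) 1).map (fun char_i => char_i + st.2)),
             st.2 + PySem.Str.len p.2))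
          (PySem.Dict.empty, 0)).1).items

-- ===== PORT B =====
def get_tok_char_map_alt (cxinst : List (String × List String)) : List (Int × List Int) :=
  match (PySem.Dict.mk cxinst).get? "text" with
  | none => []   -- Python raises KeyError here; excluded by Pre_
  | some toks =>
      let owners : List Int :=
        (PySem.List.enumerate toks).flatMap (fun p => p.2.toList.map (fun _ => p.1))
      let buckets : PySem.Dict Int (List Int) :=
        (PySem.List.pyRange 0 (toks.length : Int) 1).foldl
          (fun d i => d.insert i ([] : List Int)) PySem.Dict.empty
      ((owners.zip (PySem.List.pyRange 0 (owners.length : Int) 1)).foldl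
          (fun d p => d.modify p.1 [] (fun l => l ++ [p.2])) buckets).items

-- ===== PRECONDITION & SPEC =====
-- Pre_ excludes dicts without a "text" key, on which Python A (and B) raise KeyError.
def Pre_get_tok_char_map (cxinst : List (String × List String)) : Prop :=
  ∃ p ∈ cxinst, p.1 = "text"
instance (cxinst : List (String × List String)) : Decidable (Pre_get_tok_char_map cxinst) := by unfold Pre_get_tok_char_map; infer_instance
def pvWitness_get_tok_char_map : (List (String × List String)) := [("text", ["ab", "", "c"])]
def Spec_get_tok_char_map (cxinst : List (String × List String)) (out : List (Int × List Int)) : Prop := out = get_tok_char_map_alt cxinst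
instance (cxinst : List (String × List String)) (out : List (Int × List Int)) : Decidable (Spec_get_tok_char_map cxinst out) := by unfold Spec_get_tok_char_map; infer_instance

-- ===== CLAIM (what is proved, stated in full; the proofs are below) =====
def Claim_equal_get_tok_char_map : Prop := ∀ (cxinst : List (String × List String)), Dom_get_tok_char_map cxinst → Pre_get_tok_char_map cxinst → Spec_get_tok_char_map cxinst (get_tok_char_map cxinst)

-- ===== LEMMAS AND PROOFS =====

-- closed form both ports are reduced to: token s starts at character c
def pvChain : List String → Int → Int → List (Int × List Int)
  | [], _, _ => []
  | t :: rest, s, c =>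
      (s, PySem.List.pyRange c (c + PySem.Str.len t) 1) :: pvChain rest (s + 1) (c + PySem.Str.len t)

-- owner labels, one per character, token index starting at s
def pvOwners : List String → Int → List Int
  | [], _ => []
  | t :: rest, s => t.toList.map (fun _ => s) ++ pvOwners rest (s + 1)

-- (owner, position) pairs, token index starting at s, position starting at c
def pvPairs : List String → Int → Int → List (Int × Int)
  | [], _, _ => []
  | t :: rest, s, c =>
      (PySem.List.pyRange c (c + PySem.Str.len t) 1).map (fun j => (s, j))
        ++ pvPairs rest (s + 1) (c + PySem.Str.len t)

theorem pv_map_range (L c : Int) :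
    (PySem.List.pyRange 0 L 1).map (fun char_i => char_i + c) = PySem.List.pyRange c (c + L) 1 := by
  simp only [PySem.List.pyRange_one, List.map_map]
  have h : (c + L - c).toNat = (L - 0).toNat := by omega
  rw [h]
  exact List.map_congr_left (fun k _ => by simp [Function.comp]; omega)

theorem pv_lemA (toks : List String) (s c : Int) (d : PySem.Dict Int (List Int))
    (hd : ∀ k ∈ d.keys, k < s) :
    (((PySem.List.enumerate toks s).foldl
        (fun (st : PySem.Dict Int (List Int) × Int) p =>
          (st.1.insert p.1
             ((PySem.List.pyRange 0 (PySem.Str.len p.2) 1).map (fun char_i => char_i + st.2)),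
           st.2 + PySem.Str.len p.2))
        (d, c)).1).items = d.items ++ pvChain toks s c := by
  induction toks generalizing s c d with
  | nil => simp [PySem.List.enumerate_nil, pvChain]
  | cons t rest ih =>
      rw [PySem.List.enumerate_cons]
      simp only [List.foldl_cons]
      have hfresh : d.contains s = false := by
        by_contra h
        have : s ∈ d.keys := (PySem.Dict.contains_iff_mem_keys d s).mp (by
          cases hc : d.contains s
          · exact absurd hc h
          · rfl)
        exact absurd (hd s this) (lt_irrefl s)
      have hnew : ∀ k ∈ (d.insert s ((PySem.List.pyRange 0 (PySem.Str.len t) 1).map (fun char_i => char_i + c))).keys, k < s + 1 := by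
        intro k hk
        rcases (PySem.Dict.mem_keys_insert d s k _).mp hk with h | h
        · omega
        · have := hd k h; omega
      rw [ih (s + 1) (c + PySem.Str.len t) _ hnew]
      rw [PySem.Dict.items_insert_of_not_contains d _ hfresh]
      rw [pv_map_range]
      simp [pvChain]

-- B's owners comprehension is pvOwners
theorem pv_owners_eq (toks : List String) (s : Int) :
    (PySem.List.enumerate toks s).flatMap (fun p => p.2.toList.map (fun _ => p.1))
      = pvOwners toks s := by
  induction toks generalizing s with
  | nil => simp [PySem.List.enumerate_nil, pvOwners]
  | cons t rest ih =>
      simp only [PySem.List.enumerate_cons, List.flatMap_cons, pvOwners]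
      rw [ih]

theorem pv_zip_const {α : Type} (l : List α) (r : List Int) (s : Int)
    (h : l.length = r.length) :
    (l.map (fun _ => s)).zip r = r.map (fun j => (s, j)) := by
  induction l generalizing r with
  | nil => cases r with
      | nil => rfl
      | cons a as => simp at h
  | cons a as ih =>
      cases r with
      | nil => simp at h
      | cons b bs =>
          simp only [List.map_cons, List.zip_cons_cons]
          rw [ih bs (by simpa using h)]

theorem pv_pairs_eq (toks : List String) (s c : Int) :
    (pvOwners toks s).zip
        (PySem.List.pyRange c (c + ((pvOwners toks s).length : Int)) 1)
      = pvPairs toks s c := by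
  induction toks generalizing s c with
  | nil => simp [pvOwners, pvPairs, PySem.List.pyRange_one_eq_nil]
  | cons t rest ih =>
      simp only [pvOwners, pvPairs, List.length_append, List.length_map]
      have hlen : PySem.Str.len t = (t.toList.length : Int) := by
        simp [PySem.Str.len]
      have hsplit : PySem.List.pyRange c (c + ((t.toList.length + (pvOwners rest (s+1)).length : Nat) : Int)) 1
          = PySem.List.pyRange c (c + (t.toList.length : Int)) 1
            ++ PySem.List.pyRange (c + (t.toList.length : Int))
                 (c + ((t.toList.length + (pvOwners rest (s+1)).length : Nat) : Int)) 1 := by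
        apply PySem.List.pyRange_one_append
        · omega
        · push_cast; omega
      rw [hsplit]
      rw [List.zip_append (by
        simp only [List.length_map, PySem.List.length_pyRange_one]; omega)]
      rw [pv_zip_const _ _ s (by
        simp only [PySem.List.length_pyRange_one]; omega)]
      have : c + ((t.toList.length + (pvOwners rest (s+1)).length : Nat) : Int)
          = (c + (t.toList.length : Int)) + ((pvOwners rest (s+1)).length : Int) := by push_cast; ring
      rw [this, ih (s+1) (c + (t.toList.length : Int))]
      rw [hlen]

theorem pv_filt_low (toks : List String) (s c i : Int) (h : i < s) :
    (pvPairs toks s c).filter (fun p => p.1 == i) = [] := by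
  induction toks generalizing s c with
  | nil => rfl
  | cons t rest ih =>
      simp only [pvPairs, List.filter_append]
      rw [ih (s+1) (c + PySem.Str.len t) (by omega)]
      rw [List.append_nil, List.filter_eq_nil_iff]
      intro p hp
      simp only [List.mem_map] at hp
      obtain ⟨j, _, rfl⟩ := hp
      simp; omega

theorem pv_filter_tagged (s i : Int) (l : List Int) :
    (((l.map (fun j => (s, j))).filter (fun p => p.1 == i)).map (fun p : Int × Int => p.2))
      = if s = i then l else [] := by
  induction l with
  | nil => simp
  | cons a as ih =>
      by_cases h : s = i
      · subst h; simp [ih]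
      · simp [h, ih]

theorem pv_main (toks : List String) (s c : Int) :
    (PySem.List.pyRange s (s + (toks.length : Int)) 1).map
        (fun i => (i, ((pvPairs toks s c).filter (fun p => p.1 == i)).map (·.2)))
      = pvChain toks s c := by
  induction toks generalizing s c with
  | nil => simp [pvChain, PySem.List.pyRange_one_eq_nil]
  | cons t rest ih =>
      have hcons : PySem.List.pyRange s (s + ((t :: rest).length : Int)) 1
          = s :: PySem.List.pyRange (s+1) (s + ((t :: rest).length : Int)) 1 :=
        PySem.List.pyRange_one_cons (by simp only [List.length_cons]; push_cast; omega)
      rw [hcons, List.map_cons]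
      simp only [pvChain]
      congr 1
      · -- head: i = s keeps exactly token t's positions
        simp only [pvPairs, List.filter_append, List.map_append]
        rw [pv_filter_tagged, pv_filt_low rest (s+1) (c + PySem.Str.len t) s (by omega)]
        simp
      · -- tail: tokens after t
        have harith : s + ((t :: rest).length : Int) = (s+1) + (rest.length : Int) := by
          simp only [List.length_cons]; push_cast; ring
        rw [harith, ← ih (s+1) (c + PySem.Str.len t)]
        apply List.map_congr_left
        intro i hi
        have his : s + 1 ≤ i := (PySem.List.mem_pyRange_one.mp hi).1
        simp only [pvPairs, List.filter_append, List.map_append]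
        rw [pv_filter_tagged, if_neg (by omega)]
        simp

theorem pv_getD_insert_nil (l : List Int) (d : PySem.Dict Int (List Int)) (i : Int)
    (h : d.getD i [] = []) :
    (l.foldl (fun d j => d.insert j ([] : List Int)) d).getD i [] = [] := by
  induction l generalizing d with
  | nil => exact h
  | cons a as ih =>
      simp only [List.foldl_cons]
      apply ih
      by_cases hai : a = i
      · subst hai; exact PySem.Dict.getD_insert_self d a [] []
      · rw [PySem.Dict.getD_insert_of_ne d [] [] (Ne.symm hai)]
        exact h

theorem pv_pairs_fst_bound (toks : List String) (s c : Int) (p : Int × Int)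
    (hp : p ∈ pvPairs toks s c) : s ≤ p.1 ∧ p.1 < s + (toks.length : Int) := by
  induction toks generalizing s c with
  | nil => simp [pvPairs] at hp
  | cons t rest ih =>
      simp only [pvPairs, List.mem_append, List.mem_map] at hp
      rcases hp with ⟨j, _, rfl⟩ | h
      · simp only [List.length_cons]
        push_cast
        omega
      · have := ih (s+1) (c + PySem.Str.len t) h
        simp only [List.length_cons] at this ⊢
        push_cast at this ⊢
        omega

theorem pv_keys_buckets (l : List Int) :
    ((l.foldl (fun (d : PySem.Dict Int (List Int)) i => d.insert i ([] : List Int))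
        PySem.Dict.empty).keys) = PySem.Set.ofList l := by
  have := PySem.Dict.keys_foldl_insert (l := l)
    (f := fun (_ : PySem.Dict Int (List Int)) (_ : Int) => ([] : List Int))
    (d := PySem.Dict.empty)
  rw [this]
  rw [show PySem.Dict.empty.keys = ([] : List Int) from rfl]
  rfl

-- ===== VERDICT (by name: the statement is the Claim_ definition above) =====
theorem get_tok_char_map_spec : Claim_equal_get_tok_char_map := by
  intro cxinst _ _
  unfold Spec_get_tok_char_map get_tok_char_map get_tok_char_map_alt
  cases h : (PySem.Dict.mk cxinst).get? "text" with
  | none => rfl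
  | some toks =>
      simp only []
      -- A side
      have hA := pv_lemA toks 0 0 PySem.Dict.empty (by simp [PySem.Dict.keys_empty])
      rw [hA, show PySem.Dict.empty.items = ([] : List (Int × List Int)) from rfl,
          List.nil_append]
      -- B side
      rw [pv_owners_eq toks 0]
      have hz := pv_pairs_eq toks 0 0
      rw [zero_add] at hz
      rw [hz]
      -- keys of the buckets dict
      have hbk := pv_keys_buckets (PySem.List.pyRange 0 (toks.length : Int) 1)
      have hbset : PySem.Set.ofList (PySem.List.pyRange 0 (toks.length : Int) 1)
          = PySem.List.pyRange 0 (toks.length : Int) 1 := by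
        exact PySem.Set.ofList_eq_self_of_nodup _ (PySem.List.nodup_pyRange_one _ _)
      -- final keys
      have hFkeys := PySem.Dict.keys_foldl_modify_key
        (l := pvPairs toks 0 0) (key := fun p : Int × Int => p.1)
        (d0 := ([] : List Int))
        (f := fun d (p : Int × Int) => fun l => l ++ [p.2])
        (d := (PySem.List.pyRange 0 (toks.length : Int) 1).foldl
                (fun d i => d.insert i ([] : List Int)) PySem.Dict.empty)
      rw [hbk, hbset] at hFkeys
      have hsub : ∀ x ∈ (pvPairs toks 0 0).map (fun p : Int × Int => p.1),
          x ∈ PySem.List.pyRange 0 (toks.length : Int) 1 := by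
        intro x hx
        simp only [List.mem_map] at hx
        obtain ⟨p, hp, rfl⟩ := hx
        have := pv_pairs_fst_bound toks 0 0 p hp
        rw [PySem.List.mem_pyRange_one]
        omega
      have hupd : PySem.Set.update (PySem.List.pyRange 0 (toks.length : Int) 1)
          ((pvPairs toks 0 0).map (fun p : Int × Int => p.1))
          = PySem.List.pyRange 0 (toks.length : Int) 1 := by
        rw [PySem.Set.update_eq_append_filter]
        have : (PySem.Set.ofList ((pvPairs toks 0 0).map (fun p : Int × Int => p.1))).filter
            (fun y => !(PySem.Set.contains (PySem.List.pyRange 0 (toks.length : Int) 1) y)) = [] := by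
          rw [List.filter_eq_nil_iff]
          intro y hy
          have : y ∈ (pvPairs toks 0 0).map (fun p : Int × Int => p.1) :=
            (PySem.Set.mem_ofList _ _).mp hy
          have hmem := hsub y this
          rw [PySem.List.mem_pyRange_one] at hmem
          simpa using hmem
        rw [this, List.append_nil]
      rw [hupd] at hFkeys
      -- nodup of final keys
      have hFnodup : ((pvPairs toks 0 0).foldl
          (fun d (p : Int × Int) => d.modify p.1 [] (fun l => l ++ [p.2]))
          ((PySem.List.pyRange 0 (toks.length : Int) 1).foldl
            (fun d i => d.insert i ([] : List Int)) PySem.Dict.empty)).keys.Nodup := by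
        rw [hFkeys]; exact PySem.List.nodup_pyRange_one _ _
      -- items via keys
      rw [PySem.Dict.items_eq_map_keys _ hFnodup ([] : List Int)]
      rw [hFkeys]
      -- per-key value
      have hval : ∀ i : Int,
          ((pvPairs toks 0 0).foldl
            (fun d (p : Int × Int) => d.modify p.1 [] (fun l => l ++ [p.2]))
            ((PySem.List.pyRange 0 (toks.length : Int) 1).foldl
              (fun d i => d.insert i ([] : List Int)) PySem.Dict.empty)).getD i []
          = ((pvPairs toks 0 0).filter (fun p => p.1 == i)).map (·.2) := by
        intro i
        rw [PySem.Dict.getD_foldl_modify_append]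
        rw [pv_getD_insert_nil _ _ _ (by simp [PySem.Dict.getD_empty])]
        simp
      have := pv_main toks 0 0
      rw [show (0 : Int) + (toks.length : Int) = (toks.length : Int) by ring] at this
      rw [← this]
      apply List.map_congr_left
      intro i _
      rw [hval i]
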